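-- pv_equiv track=rewrite | github.com/daksh-devrani/SBOM-optimization-pipeline | research/static_analysis/signals.py | detect_call_path
-- ===== SOURCE A (Python) =====
-- from collections import defaultdict, deque
--
-- def detect_call_path(
--     target_functions: list[str],
--     call_graph: dict[str, list[str]],
-- ) -> bool:
--     """
--     BFS search through the call graph to find if any function eventually
--     calls one of the target (vulnerable) functions.
--
--     Args:
--         target_functions: List of vulnerable function names to search for.
--         call_graph:       Repository-level call graph from build_basic_call_graph.
--
--     Returns:
--         True if any path from any function leads to a target function.
--     """
--     if not target_functions or not call_graph:
--         return False
--
--     target_set = set(target_functions)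
--
--     # Also check short names (last segment of dotted names)
--     target_short = {t.split(".")[-1] for t in target_functions}
--
--     visited: set[str] = set()
--     queue: deque[str] = deque(call_graph.keys())
--
--     while queue:
--         current = queue.popleft()
--         if current in visited:
--             continue
--         visited.add(current)
--
--         for callee in call_graph.get(current, []):
--             if callee in target_set or callee in target_short:
--                 return True
--             if callee not in visited:
--                 queue.append(callee)
--
--     return False
-- ===== SOURCE B (Python) =====
-- def detect_call_path(
--     target_functions: list[str],
--     call_graph: dict[str, list[str]],
-- ) -> bool:
--     target_set = set(target_functions)
--     target_short = {t.split(".")[-1] for t in target_functions}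
--     return any(
--         callee in target_set or callee in target_short
--         for callees in call_graph.values()
--         for callee in callees
--     )
-- ===== Notes on version B (the rewrite author's own statement) =====
-- stated objective: simpler
-- what changed: Replaces the deque/visited BFS with a single flat any() scan over all edge lists: since the queue is seeded with every key and non-key callees contribute no edges, the BFS examines exactly the edges of the keys, so one pass over call_graph.values() suffices (the empty-input guard also becomes unnecessary).
import Mathlib
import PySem

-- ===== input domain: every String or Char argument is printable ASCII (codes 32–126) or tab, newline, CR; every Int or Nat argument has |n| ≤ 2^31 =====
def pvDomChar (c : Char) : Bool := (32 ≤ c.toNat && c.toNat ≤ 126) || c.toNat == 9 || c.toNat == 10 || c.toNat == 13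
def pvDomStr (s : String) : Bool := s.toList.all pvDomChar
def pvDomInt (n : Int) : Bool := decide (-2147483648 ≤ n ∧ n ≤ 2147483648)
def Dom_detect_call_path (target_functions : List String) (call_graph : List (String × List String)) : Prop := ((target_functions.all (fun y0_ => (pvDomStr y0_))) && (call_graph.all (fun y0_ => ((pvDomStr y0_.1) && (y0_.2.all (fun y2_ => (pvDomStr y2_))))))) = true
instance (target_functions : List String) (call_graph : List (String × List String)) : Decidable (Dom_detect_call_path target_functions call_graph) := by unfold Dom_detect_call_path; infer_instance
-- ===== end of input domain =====

-- B replaces A's deque/visited BFS by a single flat any() scan over all edge lists (simpler, same result).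


-- ===== PORT A =====
-- shared helper for both Pythons' identical line: t.split(".")[-1]
-- (splitOn never returns an empty list, so the [-1] IndexError case is unreachable; .getD "" is dead)
def pvShort (t : String) : String :=
  -- split? is some since "." ≠ ""; its result is nonempty, so neither .getD branch is reachable
  (PySem.List.pyGet? ((PySem.Str.split? t ".").getD []) (-1)).getD ""

-- call_graph.get(current, []) — first-match lookup per the assoc-list dict convention
def pvLookup (cg : List (String × List String)) (k : String) : List String :=
  match cg with
  | [] => []
  | (a, v) :: rest => if a == k then v else pvLookup rest k

-- the inner `for callee in call_graph.get(current, [])` loop: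
-- none = a target was found (A returns True); some app = the callees to append to the queue
def pvScan (isT : String → Bool) (visited : PySem.Set String) :
    List String → List String → Option (List String)
  | [], acc => some acc
  | c :: cs, acc =>
    if isT c then none
    else if !(PySem.Set.contains visited c) then pvScan isT visited cs (acc ++ [c])
    else pvScan isT visited cs acc

-- the `while queue` loop; fuel bounds the number of iterations (see the call site for the bound)
def pvBFS (edges : String → List String) (isT : String → Bool) :
    Nat → List String → PySem.Set String → Bool
  | 0, _, _ => false
  | _ + 1, [], _ => false
  | fuel + 1, current :: rest, visited =>
    if PySem.Set.contains visited current then pvBFS edges isT fuel rest visited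
    else
      let visited' := PySem.Set.add visited current
      match pvScan isT visited' (edges current) [] with
      | none => true
      | some app => pvBFS edges isT fuel (rest ++ app) visited'

def detect_call_path (target_functions : List String) (call_graph : List (String × List String)) : Bool :=
  if target_functions.isEmpty || call_graph.isEmpty then false
  else
    let targetSet : PySem.Set String := PySem.Set.ofList target_functions
    let targetShort : PySem.Set String := PySem.Set.ofList (target_functions.map pvShort)
    -- fuel = #keys + total #callees ≥ total queue insertions ≥ number of loop iterations
    pvBFS (pvLookup call_graph)
      (fun c => PySem.Set.contains targetSet c || PySem.Set.contains targetShort c)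
      (call_graph.length + (call_graph.map (fun p => p.2.length)).sum)
      (call_graph.map Prod.fst) PySem.Set.empty

-- ===== PORT B =====
def detect_call_path_alt (target_functions : List String) (call_graph : List (String × List String)) : Bool :=
  let targetSet : PySem.Set String := PySem.Set.ofList target_functions
  let targetShort : PySem.Set String := PySem.Set.ofList (target_functions.map pvShort)
  -- any(... for callees in call_graph.values() for callee in callees)
  call_graph.any (fun p =>
    p.2.any (fun c => PySem.Set.contains targetSet c || PySem.Set.contains targetShort c))

-- ===== PRECONDITION & SPEC =====
-- Pre_ only states that the assoc list represents a Python dict: keys are distinct.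
-- It excludes no input A accepts (a Python dict cannot have duplicate keys).
def Pre_detect_call_path (target_functions : List String) (call_graph : List (String × List String)) : Prop :=
  (call_graph.map Prod.fst).Nodup
instance (target_functions : List String) (call_graph : List (String × List String)) : Decidable (Pre_detect_call_path target_functions call_graph) := by unfold Pre_detect_call_path; infer_instance

def pvWitness_detect_call_path : List String × (List (String × List String)) :=
  (["a.f"], [("g", ["f"]), ("h", [])])

def Spec_detect_call_path (target_functions : List String) (call_graph : List (String × List String)) (out : Bool) : Prop := out = detect_call_path_alt target_functions call_graph
instance (target_functions : List String) (call_graph : List (String × List String)) (out : Bool) : Decidable (Spec_detect_call_path target_functions call_graph out) := by unfold Spec_detect_call_path; infer_instance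

-- ===== CLAIM (what is proved, stated in full; the proofs are below) =====
def Claim_equal_detect_call_path : Prop := ∀ (target_functions : List String) (call_graph : List (String × List String)), Dom_detect_call_path target_functions call_graph → Pre_detect_call_path target_functions call_graph → Spec_detect_call_path target_functions call_graph (detect_call_path target_functions call_graph)

-- ===== LEMMAS AND PROOFS =====

-- if some callee is a target, the inner loop returns none (A returns True)
theorem pvScan_none (isT : String → Bool) (v : PySem.Set String) (cs : List String)
    (h : cs.any isT = true) : ∀ acc, pvScan isT v cs acc = none := by
  induction cs with
  | nil => simp at h
  | cons c cs ih =>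
    intro acc
    simp only [List.any_cons, Bool.or_eq_true] at h
    cases hc : isT c with
    | true => simp [pvScan, hc]
    | false =>
      rcases h with h | h
      · rw [hc] at h; exact absurd h (by simp)
      · simp [pvScan, hc]
        split <;> exact ih h _

-- if no callee is a target, the inner loop finishes normally
theorem pvScan_isSome (isT : String → Bool) (v : PySem.Set String) (cs : List String)
    (h : cs.any isT = false) : ∀ acc, (pvScan isT v cs acc).isSome := by
  induction cs with
  | nil => intro acc; simp [pvScan]
  | cons c cs ih =>
    intro acc
    simp only [List.any_cons, Bool.or_eq_false_iff] at h
    simp [pvScan, h.1]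
    split <;> exact ih h.2 _

-- if no node's edge list contains a target, the BFS returns False, whatever its state
theorem pvBFS_false (edges : String → List String) (isT : String → Bool)
    (H : ∀ x, (edges x).any isT = false) :
    ∀ fuel queue visited, pvBFS edges isT fuel queue visited = false := by
  intro fuel
  induction fuel with
  | zero => intro queue visited; rfl
  | succ f ih =>
    intro queue visited
    match queue with
    | [] => rfl
    | current :: rest =>
      simp only [pvBFS]
      split
      · exact ih _ _
      · have hs := pvScan_isSome isT (PySem.Set.add visited current) (edges current) (H current) []
        cases he : pvScan isT (PySem.Set.add visited current) (edges current) [] with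
        | none => rw [he] at hs; simp at hs
        | some app => exact ih _ _

-- if some unvisited queue element's edge list contains a target and the fuel covers its
-- position, the BFS returns True
theorem pvBFS_true (edges : String → List String) (isT : String → Bool) :
    ∀ (fuel : Nat) (queue : List String) (visited : PySem.Set String) (i : Nat) (k : String),
    queue[i]? = some k → i < fuel → PySem.Set.contains visited k = false →
    (edges k).any isT = true → pvBFS edges isT fuel queue visited = true := by
  intro fuel
  induction fuel with
  | zero => intro _ _ i _ _ hi _ _; omega
  | succ f ih =>
    intro queue visited i k hget hlt hvis hhit
    match queue with
    | [] => simp at hget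
    | current :: rest =>
      by_cases hck : current = k
      · subst hck
        simp only [pvBFS, hvis, Bool.false_eq_true, if_false]
        rw [pvScan_none isT _ _ hhit]
      · have hi : i ≠ 0 := by
          intro h0; subst h0; simp at hget; exact hck hget
        obtain ⟨j, rfl⟩ : ∃ j, i = j + 1 := ⟨i - 1, by omega⟩
        have hrest : rest[j]? = some k := by simpa using hget
        have hjlt : j < rest.length := by
          have := List.getElem?_eq_some_iff.mp hrest; exact this.1
        simp only [pvBFS]
        split
        · exact ih rest visited j k hrest (by omega) hvis hhit
        · have hvis' : PySem.Set.contains (PySem.Set.add visited current) k = false := by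
            rw [Bool.eq_false_iff]
            intro hc
            rw [PySem.Set.contains_iff] at hc
            rw [PySem.Set.mem_add] at hc
            rcases hc with hc | hc
            · rw [← PySem.Set.contains_iff] at hc; rw [hc] at hvis; simp at hvis
            · exact hck hc.symm
          cases he : pvScan isT (PySem.Set.add visited current) (edges current) [] with
          | none => rfl
          | some app =>
            simp only
            refine ih (rest ++ app) _ j k ?_ (by omega) hvis' hhit
            rw [List.getElem?_append_left hjlt]; exact hrest

-- first-match lookup in a nodup-keyed assoc list finds the pair's own value
theorem pvLookup_of_mem (cg : List (String × List String)) (hnd : (cg.map Prod.fst).Nodup)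
    (p : String × List String) (hp : p ∈ cg) : pvLookup cg p.1 = p.2 := by
  induction cg with
  | nil => simp at hp
  | cons q rest ih =>
    obtain ⟨a, v⟩ := q
    simp only [List.map_cons, List.nodup_cons] at hnd
    rcases List.mem_cons.mp hp with rfl | hp
    · simp [pvLookup]
    · have hne : ¬ (a = p.1) := by
        intro h; exact hnd.1 (h ▸ List.mem_map_of_mem hp)
      rw [pvLookup, if_neg (by simpa using hne)]
      exact ih hnd.2 hp

-- every lookup result is [] or the value of some pair of cg
theorem pvLookup_cases (cg : List (String × List String)) (x : String) :
    pvLookup cg x = [] ∨ ∃ p ∈ cg, pvLookup cg x = p.2 := by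
  induction cg with
  | nil => left; rfl
  | cons q rest ih =>
    obtain ⟨a, v⟩ := q
    by_cases h : (a == x) = true
    · right; exact ⟨(a, v), List.mem_cons_self .., by simp [pvLookup, h]⟩
    · rw [pvLookup, if_neg h]
      rcases ih with h' | ⟨p, hp, h'⟩
      · left; exact h'
      · right; exact ⟨p, List.mem_cons_of_mem _ hp, h'⟩

-- ===== VERDICT (by name: the statement is the Claim_ definition above) =====
theorem detect_call_path_spec : Claim_equal_detect_call_path := by
  intro tf cg _ hpre
  unfold Spec_detect_call_path detect_call_path detect_call_path_alt
  set isT : String → Bool := fun c =>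
    PySem.Set.contains (PySem.Set.ofList tf) c ||
    PySem.Set.contains (PySem.Set.ofList (tf.map pvShort)) c with hisT
  by_cases hB : cg.any (fun p => p.2.any isT) = true
  · -- some edge hits a target: both sides are true
    rw [hB]
    obtain ⟨p, hp, hhit⟩ := List.any_eq_true.mp hB
    obtain ⟨c, _, hc⟩ := List.any_eq_true.mp hhit
    -- a target hit forces target_functions nonempty, so the guard does not fire
    have htf : tf ≠ [] := by
      intro h; subst h; simp [hisT, PySem.Set.ofList, PySem.Set.contains] at hc
    have hcg : cg ≠ [] := by intro h; subst h; simp at hp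
    rw [if_neg (by simp [htf, hcg, List.isEmpty_iff])]
    obtain ⟨i, hilt, hik⟩ := List.getElem_of_mem (List.mem_map_of_mem (f := Prod.fst) hp)
    refine pvBFS_true _ _ _ _ _ i p.1 (by rw [List.getElem?_eq_some_iff]; exact ⟨hilt, hik⟩)
      (by simp at hilt; omega) (by simp [PySem.Set.empty, PySem.Set.contains]) ?_
    rw [pvLookup_of_mem cg hpre p hp]; exact hhit
  · -- no edge hits a target: both sides are false
    rw [Bool.eq_false_iff.mpr hB]
    split
    · rfl
    · refine pvBFS_false _ _ ?_ _ _ _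
      intro x
      rcases pvLookup_cases cg x with h | ⟨p, hp, h⟩
      · simp [h]
      · rw [h, Bool.eq_false_iff]
        intro hhit
        exact hB (List.any_eq_true.mpr ⟨p, hp, hhit⟩)
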